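-- pv_equiv track=rewrite | github.com/laud1204/TDsPython | TD5/exercice1.py | nombre_max
-- ===== SOURCE A (Python) =====
-- def plus_long(tableau):
--     longueur = 1
--     i = 1
--     plusGdeLongueur = longueur
--     while i < len(tableau):
--         if tableau[i] == tableau[i-1]:
--             longueur += 1
--         else:
--             if plusGdeLongueur < longueur:
--                 plusGdeLongueur = longueur
--             longueur = 1
--         i += 1
--     if longueur > plusGdeLongueur:
--         plusGdeLongueur = longueur
--     return plusGdeLongueur
--
-- def nombre_max(tableau):
--     plusLong = plus_long(tableau)
--     longueur = 1
--     i = 1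
--     nb_max = 0
--     while i < len(tableau):
--         if tableau[i] == tableau[i - 1]:
--             longueur += 1
--         else:
--             if plusLong == longueur:
--                 nb_max += 1
--             longueur = 1
--         i += 1
--     if plusLong == longueur:
--         nb_max += 1
--     return plusLong, nb_max
-- ===== SOURCE B (Python) =====
-- def nombre_max(tableau):
--     # Materialise the run-length table in one pass, then reduce with max/count.
--     # On the empty list this returns (0, 0) (no runs), where A returns its sentinel (1, 1).
--     if not tableau:
--         return (0, 0)
--     runs = []
--     n = 1
--     for prev, cur in zip(tableau, tableau[1:]):
--         if cur == prev:
--             n += 1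
--         else:
--             runs.append(n)
--             n = 1
--     runs.append(n)
--     m = max(runs)
--     return (m, runs.count(m))
-- ===== Notes on version B (the rewrite author's own statement) =====
-- stated objective: faster
-- what changed: B builds the run-length table in a single pass and reduces it with max/count, instead of A's two interleaved index-based scans of the whole array (one loop for the longest run, a second full loop for its count).
-- intended difference: On the empty list A returns the sentinel (1, 1), claiming a run of length 1 that does not exist; B returns (0, 0), the intended answer when there are no runs. — e.g. on nombre_max([]): A returns (1, 1), B returns (0, 0)
import Mathlib
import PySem

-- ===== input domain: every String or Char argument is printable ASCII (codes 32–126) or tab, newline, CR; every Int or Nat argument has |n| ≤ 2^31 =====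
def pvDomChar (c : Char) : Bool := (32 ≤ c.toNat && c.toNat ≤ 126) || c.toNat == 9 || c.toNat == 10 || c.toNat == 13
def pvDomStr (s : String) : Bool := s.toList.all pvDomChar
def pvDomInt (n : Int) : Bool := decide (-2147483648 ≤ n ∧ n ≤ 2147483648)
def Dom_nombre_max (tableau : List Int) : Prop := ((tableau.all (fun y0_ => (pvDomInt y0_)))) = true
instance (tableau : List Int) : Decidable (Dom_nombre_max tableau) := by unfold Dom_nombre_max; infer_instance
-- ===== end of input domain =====

-- B materialises the run-length table in one pass and reduces it with max/count,
-- instead of A's two interleaved scans; on the empty list A returns its sentinel (1, 1)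
-- while B returns (0, 0) (stated as the intended difference D_ below).


-- ===== PORT A =====
-- while-loop of plus_long: state (longueur, plusGdeLongueur), comparing each element to the previous
def pvPlusLongLoop (prev : Int) (rest : List Int) (longueur plusGde : Int) : Int :=
  match rest with
  | [] => if longueur > plusGde then longueur else plusGde
  | x :: xs =>
    if x == prev then pvPlusLongLoop x xs (longueur + 1) plusGde
    else pvPlusLongLoop x xs 1 (if plusGde < longueur then longueur else plusGde)

def plus_long (tableau : List Int) : Int :=
  match tableau with
  | [] => 1                       -- loop body never runs; final check leaves plusGdeLongueur = 1
  | x :: xs => pvPlusLongLoop x xs 1 1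

-- while-loop of nombre_max: state (longueur, nb_max)
def pvNbMaxLoop (plusLong prev : Int) (rest : List Int) (longueur nb_max : Int) : Int :=
  match rest with
  | [] => if plusLong == longueur then nb_max + 1 else nb_max
  | x :: xs =>
    if x == prev then pvNbMaxLoop plusLong x xs (longueur + 1) nb_max
    else pvNbMaxLoop plusLong x xs 1 (if plusLong == longueur then nb_max + 1 else nb_max)

def nombre_max (tableau : List Int) : Int × Int :=
  let plusLong := plus_long tableau
  match tableau with
  | [] => (plusLong, if plusLong == 1 then (1 : Int) else 0)  -- loop never runs; final check on longueur = 1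
  | x :: xs => (plusLong, pvNbMaxLoop plusLong x xs 1 0)

-- ===== PORT B =====
def nombre_max_alt (tableau : List Int) : Int × Int :=
  match tableau with
  | [] => (0, 0)
  | _ :: _ =>
    -- for prev, cur in zip(tableau, tableau[1:]): build the run-length table
    let st := (List.zip tableau (PySem.List.slice tableau (some 1) none)).foldl
      (fun (st : List Int × Int) (pc : Int × Int) =>
        if pc.2 == pc.1 then (st.1, st.2 + 1) else (st.1 ++ [st.2], 1)) ([], 1)
    let runs := st.1 ++ [st.2]
    let m := (PySem.List.max? runs (fun y => y)).getD 0  -- runs ≠ [] here, so max(runs) exists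
    (m, PySem.List.count runs m)

-- ===== PRECONDITION & SPEC =====
-- On the empty list A returns the sentinel (1, 1), claiming a run of length 1 that does not
-- exist; B returns (0, 0), the intended answer when there are no runs.
def D_nombre_max (tableau : List Int) : Prop := tableau = []
instance (tableau : List Int) : Decidable (D_nombre_max tableau) := by unfold D_nombre_max; infer_instance
def Spec_nombre_max (tableau : List Int) (out : Int × Int) : Prop := ¬ D_nombre_max tableau → out = nombre_max_alt tableau
instance (tableau : List Int) (out : Int × Int) : Decidable (Spec_nombre_max tableau out) := by unfold Spec_nombre_max; infer_instance
def pvDiffWitness_nombre_max : List Int := []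
def pvDiffWitnessOut_nombre_max : (Int × Int) × (Int × Int) := ((1, 1), (0, 0))

-- ===== CLAIM (what is proved, stated in full; the proofs are below) =====
def Claim_unchanged_nombre_max : Prop := ∀ (tableau : List Int), Dom_nombre_max tableau → Spec_nombre_max tableau (nombre_max tableau)
def Claim_changed_nombre_max : Prop := Dom_nombre_max (pvDiffWitness_nombre_max) ∧ D_nombre_max (pvDiffWitness_nombre_max) ∧ nombre_max (pvDiffWitness_nombre_max) = pvDiffWitnessOut_nombre_max.1 ∧ nombre_max_alt (pvDiffWitness_nombre_max) = pvDiffWitnessOut_nombre_max.2 ∧ pvDiffWitnessOut_nombre_max.1 ≠ pvDiffWitnessOut_nombre_max.2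
def Claim_exact_nombre_max : Prop := ∀ (tableau : List Int), Dom_nombre_max tableau → D_nombre_max tableau → nombre_max tableau ≠ nombre_max_alt tableau

-- ===== LEMMAS AND PROOFS =====

-- the run-length table of prev :: rest, with the current run already of length n
def runsAux (prev : Int) (rest : List Int) (n : Int) : List Int :=
  match rest with
  | [] => [n]
  | x :: xs => if x == prev then runsAux x xs (n + 1) else n :: runsAux x xs 1

theorem runsAux_ne_nil (rest : List Int) : ∀ (prev n : Int), runsAux prev rest n ≠ [] := by
  induction rest with
  | nil => intro prev n; simp [runsAux]
  | cons x xs ih => intro prev n; simp only [runsAux]; split <;> simp [ih]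

def listMax : List Int → Int
  | [] => 0
  | [a] => a
  | a :: b :: as => max a (listMax (b :: as))

theorem listMax_cons (a : Int) (rs : List Int) (h : rs ≠ []) :
    listMax (a :: rs) = max a (listMax rs) := by
  cases rs with
  | nil => exact absurd rfl h
  | cons b bs => rfl

theorem foldl_max_eq_listMax (t : List Int) : ∀ (x : Int), t.foldl max x = listMax (x :: t) := by
  induction t with
  | nil => intro x; rfl
  | cons a as ih =>
    intro x
    show as.foldl max (max x a) = listMax (x :: a :: as)
    rw [ih (max x a)]
    cases as with
    | nil => simp [listMax]
    | cons c cs =>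
      rw [listMax_cons (max x a) (c :: cs) (by simp), listMax_cons x (a :: c :: cs) (by simp),
        listMax_cons a (c :: cs) (by simp)]
      omega

theorem one_le_listMax_runsAux (rest : List Int) : ∀ (prev n : Int), 1 ≤ n →
    1 ≤ listMax (runsAux prev rest n) := by
  induction rest with
  | nil => intro prev n h; simpa [runsAux, listMax] using h
  | cons x xs ih =>
    intro prev n h
    simp only [runsAux]
    split
    · exact ih x (n + 1) (by omega)
    · rw [listMax_cons n _ (runsAux_ne_nil xs x 1)]
      omega

theorem plusLongLoop_eq (rest : List Int) : ∀ (prev l g : Int),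
    pvPlusLongLoop prev rest l g = max g (listMax (runsAux prev rest l)) := by
  induction rest with
  | nil =>
    intro prev l g
    simp only [pvPlusLongLoop, runsAux, listMax]
    omega
  | cons x xs ih =>
    intro prev l g
    simp only [pvPlusLongLoop, runsAux]
    split
    · exact ih x (l + 1) g
    · rw [ih x 1 (if g < l then l else g), listMax_cons l _ (runsAux_ne_nil xs x 1)]
      omega

theorem nbMaxLoop_eq (rest : List Int) : ∀ (m prev l nb : Int),
    pvNbMaxLoop m prev rest l nb = nb + ((runsAux prev rest l).count m : Int) := by
  induction rest with
  | nil =>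
    intro m prev l nb
    simp only [pvNbMaxLoop, runsAux, List.count_cons, List.count_nil]
    by_cases h : m = l <;> simp [h, beq_iff_eq] <;> omega
  | cons x xs ih =>
    intro m prev l nb
    simp only [pvNbMaxLoop, runsAux]
    split
    · exact ih m x (l + 1) nb
    · rw [ih m x 1 _, List.count_cons]
      by_cases h : l = m <;> simp [h, beq_iff_eq] <;> omega

-- the B-side fold over zipped adjacent pairs builds exactly the run-length table
theorem zip_fold_runs (rest : List Int) : ∀ (prev : Int) (acc : List Int) (n : Int),
    (let st := (List.zip (prev :: rest) rest).foldl
      (fun (st : List Int × Int) (pc : Int × Int) =>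
        if pc.2 == pc.1 then (st.1, st.2 + 1) else (st.1 ++ [st.2], 1)) (acc, n)
     st.1 ++ [st.2]) = acc ++ runsAux prev rest n := by
  induction rest with
  | nil => intro prev acc n; simp [runsAux]
  | cons x xs ih =>
    intro prev acc n
    simp only [List.zip_cons_cons, List.foldl_cons, runsAux]
    by_cases h : x = prev
    · simpa [h] using ih x acc (n + 1)
    · simpa [h] using ih x (acc ++ [n]) 1

-- ===== VERDICT (by name: the statement is the Claim_ definition above) =====
theorem nombre_max_spec : Claim_unchanged_nombre_max := by
  intro tableau _ hnd
  cases tableau with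
  | nil => exact absurd rfl hnd
  | cons x xs =>
    show (plus_long (x :: xs), pvNbMaxLoop (plus_long (x :: xs)) x xs 1 0) = nombre_max_alt (x :: xs)
    have hruns := zip_fold_runs xs x [] 1
    simp only [nombre_max_alt, PySem.List.slice_from_one, List.tail_cons]
    have hm : (PySem.List.max? ([] ++ runsAux x xs 1) (fun y => y)).getD 0 = listMax (runsAux x xs 1) := by
      simp only [List.nil_append]
      cases h : runsAux x xs 1 with
      | nil => exact absurd h (runsAux_ne_nil xs x 1)
      | cons a as =>
        rw [PySem.List.max?_id_cons, Option.getD_some, foldl_max_eq_listMax]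
    have hpl : plus_long (x :: xs) = listMax (runsAux x xs 1) := by
      show pvPlusLongLoop x xs 1 1 = _
      rw [plusLongLoop_eq]
      have := one_le_listMax_runsAux xs x 1 (by omega)
      omega
    rw [show ((List.zip (x :: xs) xs).foldl
        (fun (st : List Int × Int) (pc : Int × Int) =>
          if pc.2 == pc.1 then (st.1, st.2 + 1) else (st.1 ++ [st.2], 1)) ([], 1)).1 ++
        [((List.zip (x :: xs) xs).foldl
        (fun (st : List Int × Int) (pc : Int × Int) =>
          if pc.2 == pc.1 then (st.1, st.2 + 1) else (st.1 ++ [st.2], 1)) ([], 1)).2] =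
        [] ++ runsAux x xs 1 from hruns]
    rw [hm, hpl, nbMaxLoop_eq, PySem.List.count_eq]
    simp

theorem nombre_max_changed : Claim_changed_nombre_max := by
  unfold Claim_changed_nombre_max; decide

theorem nombre_max_tight : Claim_exact_nombre_max := by
  intro tableau _ hd
  subst hd
  decide
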